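-- pv_equiv track=rewrite | github.com/Helen2813/Thesis_v3 | 01_Causal_feature_extraction/MB/run_mb_multimodal_2exper.py | modality_breakdown
-- ===== SOURCE A (Python) =====
-- MODALITY_PREFIXES = ["CLIN_", "RNA_", "CNV_", "MUT_", "PROT_", "METH_", "MIRNA_"]
--
-- def modality_breakdown(features):
--     counts = {}
--     for p in MODALITY_PREFIXES:
--         n = sum(1 for f in features if f.startswith(p))
--         if n > 0:
--             counts[p.rstrip("_")] = n
--     other = sum(1 for f in features
--                 if not any(f.startswith(p) for p in MODALITY_PREFIXES))
--     if other > 0: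
--         counts["OTHER"] = other
--     return counts
-- ===== SOURCE B (Python) =====
-- MODALITY_PREFIXES = ["CLIN_", "RNA_", "CNV_", "MUT_", "PROT_", "METH_", "MIRNA_"]
--
-- def modality_breakdown(features):
--     # One pass: classify each feature by its (unique) matching prefix, tally,
--     # then emit the tallies in the fixed modality order (zero counts never appear).
--     tally = {}
--     for f in features:
--         key = next((p.rstrip("_") for p in MODALITY_PREFIXES if f.startswith(p)), "OTHER")
--         tally[key] = tally.get(key, 0) + 1
--     order = [p.rstrip("_") for p in MODALITY_PREFIXES] + ["OTHER"]
--     return {k: tally[k] for k in order if k in tally}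
-- ===== Notes on version B (the rewrite author's own statement) =====
-- stated objective: faster
-- what changed: Replaces the per-prefix repeated scans of the feature list (one scan per modality plus one for OTHER) with a single pass that classifies each feature once into a tally dict, then emits the tallies in the fixed modality order.
import Mathlib
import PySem

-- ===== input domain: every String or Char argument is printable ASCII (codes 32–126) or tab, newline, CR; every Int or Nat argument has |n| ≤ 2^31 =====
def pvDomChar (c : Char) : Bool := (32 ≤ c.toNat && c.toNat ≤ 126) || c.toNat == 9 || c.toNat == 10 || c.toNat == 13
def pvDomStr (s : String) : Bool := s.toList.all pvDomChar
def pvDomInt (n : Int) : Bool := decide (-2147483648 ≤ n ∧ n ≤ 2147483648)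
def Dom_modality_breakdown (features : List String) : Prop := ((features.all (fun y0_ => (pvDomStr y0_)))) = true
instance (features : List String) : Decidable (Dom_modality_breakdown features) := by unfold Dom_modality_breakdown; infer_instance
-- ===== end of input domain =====

-- B replaces A's per-prefix repeated scans with a single classifying pass plus an ordered emit (measurably faster by a constant factor).


-- module constant MODALITY_PREFIXES
def pvModalityPrefixes : List String := ["CLIN_", "RNA_", "CNV_", "MUT_", "PROT_", "METH_", "MIRNA_"]

-- hand port of s.rstrip("_") (strip the single char '_' from the right); exact: drops exactly the trailing underscores
def pvRstripUnderscore (s : String) : String :=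
  String.ofList ((s.toList.reverse.dropWhile (fun c => c == '_')).reverse)

-- ===== PORT A =====
def modality_breakdown (features : List String) : List (String × Int) :=
  let counts : PySem.Dict String Int :=
    pvModalityPrefixes.foldl (fun counts p =>
      let n : Int := features.foldl (fun acc f => if PySem.Str.startswith f p then acc + 1 else acc) 0
      if n > 0 then counts.insert (pvRstripUnderscore p) n else counts) PySem.Dict.empty
  let other : Int := features.foldl (fun acc f =>
      if !(pvModalityPrefixes.any (fun p => PySem.Str.startswith f p)) then acc + 1 else acc) 0
  let counts := if other > 0 then counts.insert "OTHER" other else counts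
  counts.items

-- ===== PORT B =====
-- next((p.rstrip("_") for p in MODALITY_PREFIXES if f.startswith(p)), "OTHER")
def pvClassify (f : String) : String :=
  ((pvModalityPrefixes.find? (fun p => PySem.Str.startswith f p)).map pvRstripUnderscore).getD "OTHER"

def modality_breakdown_alt (features : List String) : List (String × Int) :=
  let tally : PySem.Dict String Int :=
    features.foldl (fun tally f => tally.modify (pvClassify f) 0 (· + 1)) PySem.Dict.empty
  let order : List String := pvModalityPrefixes.map pvRstripUnderscore ++ ["OTHER"]
  -- {k: tally[k] for k in order if k in tally} : the guarded lookup is get?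
  order.filterMap (fun k => (tally.get? k).map (fun v => (k, v)))

-- ===== PRECONDITION & SPEC =====
def Spec_modality_breakdown (features : List String) (out : List (String × Int)) : Prop := out = modality_breakdown_alt features
instance (features : List String) (out : List (String × Int)) : Decidable (Spec_modality_breakdown features out) := by unfold Spec_modality_breakdown; infer_instance

-- ===== CLAIM (what is proved, stated in full; the proofs are below) =====
def Claim_equal_modality_breakdown : Prop := ∀ (features : List String), Dom_modality_breakdown features → Spec_modality_breakdown features (modality_breakdown features)

-- ===== LEMMAS AND PROOFS =====

-- counting fold = countP
lemma pv_foldl_count {α : Type} (c : α → Bool) (l : List α) (n : Int) :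
    l.foldl (fun acc f => if c f then acc + 1 else acc) n = n + (l.countP c : Int) := by
  induction l generalizing n with
  | nil => simp
  | cons x xs ih =>
    simp only [List.foldl_cons, List.countP_cons, ih]
    by_cases h : c x <;> simp [h] <;> push_cast <;> ring

-- no prefix in the list is a prefix of another (checked on the literals)
lemma pv_prefixes_unique (f p q : String) (hp : p ∈ pvModalityPrefixes) (hq : q ∈ pvModalityPrefixes)
    (hfp : PySem.Str.startswith f p = true) (hfq : PySem.Str.startswith f q = true) : p = q := by
  have hfact : ∀ p ∈ pvModalityPrefixes, ∀ q ∈ pvModalityPrefixes,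
      p.toList <+: q.toList → p = q := by decide
  have h1 : p.toList <+: f.toList := (PySem.Chars.startswith_iff _ _).mp (by simpa using hfp)
  have h2 : q.toList <+: f.toList := (PySem.Chars.startswith_iff _ _).mp (by simpa using hfq)
  rcases List.prefix_or_prefix_of_prefix h1 h2 with h | h
  · exact hfact p hp q hq h
  · exact (hfact q hq p hp h).symm

lemma pv_rstrip_inj (p q : String) (hp : p ∈ pvModalityPrefixes) (hq : q ∈ pvModalityPrefixes)
    (h : pvRstripUnderscore p = pvRstripUnderscore q) : p = q := by
  have hfact : ∀ p ∈ pvModalityPrefixes, ∀ q ∈ pvModalityPrefixes,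
      pvRstripUnderscore p = pvRstripUnderscore q → p = q := by decide
  exact hfact p hp q hq h

lemma pv_name_ne_other (p : String) (hp : p ∈ pvModalityPrefixes) :
    pvRstripUnderscore p ≠ "OTHER" := by
  have hfact : ∀ p ∈ pvModalityPrefixes, pvRstripUnderscore p ≠ "OTHER" := by decide
  exact hfact p hp

lemma pv_classify_eq_name (f p : String) (hp : p ∈ pvModalityPrefixes) :
    (pvClassify f = pvRstripUnderscore p) ↔ PySem.Str.startswith f p = true := by
  constructor
  · intro h
    unfold pvClassify at h
    cases hfind : pvModalityPrefixes.find? (fun p => PySem.Str.startswith f p) with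
    | none =>
      rw [hfind] at h; simp only [Option.map_none, Option.getD_none] at h
      exact absurd h.symm (pv_name_ne_other p hp)
    | some q =>
      rw [hfind] at h; simp only [Option.map_some, Option.getD_some] at h
      have hqmem := List.mem_of_find?_eq_some hfind
      have hqst : PySem.Str.startswith f q = true := List.find?_some hfind
      have : q = p := pv_rstrip_inj q p hqmem hp h
      exact this ▸ hqst
  · intro h
    unfold pvClassify
    cases hfind : pvModalityPrefixes.find? (fun p => PySem.Str.startswith f p) with
    | none =>
      have := List.find?_eq_none.mp hfind p hp
      exact absurd h (by simpa using this)
    | some q =>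
      simp only [Option.map_some, Option.getD_some]
      have hqmem := List.mem_of_find?_eq_some hfind
      have hqst : PySem.Str.startswith f q = true := List.find?_some hfind
      have : q = p := pv_prefixes_unique f q p hqmem hp hqst h
      rw [this]

lemma pv_classify_eq_other (f : String) :
    (pvClassify f = "OTHER") ↔ (pvModalityPrefixes.any (fun p => PySem.Str.startswith f p) = false) := by
  unfold pvClassify
  cases hfind : pvModalityPrefixes.find? (fun p => PySem.Str.startswith f p) with
  | none =>
    simp only [Option.map_none, Option.getD_none, true_iff]
    have := List.find?_eq_none.mp hfind
    simp only [List.any_eq_false]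
    intro p hp
    simpa using this p hp
  | some q =>
    simp only [Option.map_some, Option.getD_some]
    have hqmem := List.mem_of_find?_eq_some hfind
    have hqst : PySem.Str.startswith f q = true := List.find?_some hfind
    constructor
    · intro h; exact absurd h (pv_name_ne_other q hqmem)
    · intro h
      rw [List.any_eq_false] at h
      exact absurd hqst (by simpa using h q hqmem)

-- items of A's conditional-insert fold over fresh distinct keys
lemma pv_a_fold_items (cnt : String → Int) :
    ∀ (ps : List String) (d : PySem.Dict String Int),
      (∀ p ∈ ps, d.contains (pvRstripUnderscore p) = false) →
      (ps.map pvRstripUnderscore).Nodup →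
      (ps.foldl (fun d p => if cnt p > 0 then d.insert (pvRstripUnderscore p) (cnt p) else d) d).items
        = d.items ++ ps.filterMap (fun p => if cnt p > 0 then some (pvRstripUnderscore p, cnt p) else none) := by
  intro ps
  induction ps with
  | nil => intro d _ _; simp
  | cons p ps ih =>
    intro d hfresh hnd
    simp only [List.map_cons, List.nodup_cons] at hnd
    by_cases hc : cnt p > 0
    · have hpc : d.contains (pvRstripUnderscore p) = false := hfresh p (by simp)
      have hitems := PySem.Dict.items_insert_of_not_contains (d := d)
        (k := pvRstripUnderscore p) (v := cnt p) hpc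
      have hstep := ih (d.insert (pvRstripUnderscore p) (cnt p))
        (by
          intro q hq
          rw [PySem.Dict.contains_insert]
          have hne : pvRstripUnderscore q ≠ pvRstripUnderscore p := by
            intro h; exact hnd.1 (h ▸ (List.mem_map_of_mem hq))
          simp [hne, hfresh q (by simp [hq])])
        hnd.2
      simp only [List.foldl_cons, if_pos hc, hstep, hitems, List.filterMap_cons, if_pos hc,
        List.append_assoc, List.cons_append, List.nil_append]
    · have hstep := ih d (fun q hq => hfresh q (by simp [hq])) hnd.2
      simp only [List.foldl_cons, if_neg hc, hstep, List.filterMap_cons, if_neg hc]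

-- get? on the one-pass tally, as a function of the classified multiset
lemma pv_get?_counter (xs : List String) (k : String) :
    (PySem.Dict.counter xs).get? k = if 0 < xs.count k then some ((xs.count k : Int)) else none := by
  by_cases hm : k ∈ xs
  · have hcont : (PySem.Dict.counter xs).contains k = true := by
      rw [PySem.Dict.contains_iff_mem_keys, PySem.Dict.keys_counter]
      simpa [PySem.Set.mem_ofList] using hm
    have hpos : 0 < xs.count k := List.count_pos_iff.mpr hm
    have hgd := PySem.Dict.getD_counter (xs := xs) (v := k)
    cases hg : (PySem.Dict.counter xs).get? k with
    | none =>
      exfalso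
      have := (PySem.Dict.get?_eq_none_iff_contains (d := PySem.Dict.counter xs) (k := k)).mp hg
      simp [hcont] at this
    | some v =>
      have : (PySem.Dict.counter xs).getD k 0 = v :=
        PySem.Dict.getD_of_get?_eq_some _ 0 hg
      rw [hgd] at this
      simp [hpos, ← this]
  · have hcont : (PySem.Dict.counter xs).contains k = false := by
      rw [← Bool.not_eq_true, PySem.Dict.contains_iff_mem_keys, PySem.Dict.keys_counter]
      simpa [PySem.Set.mem_ofList] using hm
    have h0 : xs.count k = 0 := List.count_eq_zero.mpr hm
    rw [(PySem.Dict.get?_eq_none_iff_contains _ _).mpr hcont]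
    simp [h0]

-- contains "OTHER" is false on A's per-prefix dict
lemma pv_not_contains_other (cnt : String → Int) :
    (pvModalityPrefixes.foldl
      (fun d p => if cnt p > 0 then d.insert (pvRstripUnderscore p) (cnt p) else d)
      PySem.Dict.empty).contains "OTHER" = false := by
  by_contra h
  rw [Bool.not_eq_false, PySem.Dict.contains_iff_mem_keys, PySem.Dict.keys] at h
  rw [pv_a_fold_items cnt pvModalityPrefixes PySem.Dict.empty
      (by intro p _; simp [PySem.Dict.contains_empty]) (by decide)] at h
  simp only [show (PySem.Dict.empty : PySem.Dict String Int).items = [] from rfl,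
    List.nil_append, List.mem_map, List.mem_filterMap] at h
  obtain ⟨⟨k, v⟩, ⟨p, hp, hsome⟩, hfst⟩ := h
  by_cases hc : cnt p > 0 <;> simp [hc] at hsome
  exact pv_name_ne_other p hp (by rw [hsome.1]; exact hfst)

-- ===== VERDICT (by name: the statement is the Claim_ definition above) =====
theorem modality_breakdown_spec : Claim_equal_modality_breakdown := by
  intro features _
  unfold Spec_modality_breakdown modality_breakdown modality_breakdown_alt
  simp only [pv_foldl_count, zero_add]
  -- the one-pass tally is the counter of the classified features
  have htally : features.foldl (fun tally f => tally.modify (pvClassify f) 0 (· + 1)) PySem.Dict.empty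
      = PySem.Dict.counter (features.map pvClassify) := by
    rw [PySem.Dict.counter_eq_foldl, List.foldl_map]
  simp only [htally, pv_get?_counter]
  -- per-key counts agree
  have hcntP : ∀ p ∈ pvModalityPrefixes,
      (features.map pvClassify).count (pvRstripUnderscore p)
        = features.countP (fun f => PySem.Str.startswith f p) := by
    intro p hp
    rw [List.count_eq_countP, List.countP_map]
    refine List.countP_congr (fun f _ => ?_)
    simp only [Function.comp_apply, beq_iff_eq]
    exact pv_classify_eq_name f p hp
  have hcntO :
      (features.map pvClassify).count "OTHER"
        = features.countP (fun f => !(pvModalityPrefixes.any fun p => PySem.Str.startswith f p)) := by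
    rw [List.count_eq_countP, List.countP_map]
    refine List.countP_congr (fun f _ => ?_)
    simp only [Function.comp_apply, beq_iff_eq, Bool.not_eq_true']
    exact pv_classify_eq_other f
  -- A's items via the fresh-key fold lemma
  have hitems := pv_a_fold_items
      (fun p => ((features.countP fun f => PySem.Str.startswith f p : Nat) : Int))
      pvModalityPrefixes PySem.Dict.empty
      (by intro p _; simp [PySem.Dict.contains_empty]) (by decide)
  simp only [show (PySem.Dict.empty : PySem.Dict String Int).items = [] from rfl,
    List.nil_append] at hitems
  have hcont := pv_not_contains_other
      (fun p => ((features.countP fun f => PySem.Str.startswith f p : Nat) : Int))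
  have hins := PySem.Dict.items_insert_of_not_contains _
      (v := ((features.countP fun f =>
        !(pvModalityPrefixes.any fun p => PySem.Str.startswith f p) : Nat) : Int)) hcont
  rw [apply_ite PySem.Dict.items, hins, hitems]
  simp only [List.filterMap_append, List.filterMap_map]
  have hfm := List.filterMap_congr (l := pvModalityPrefixes)
    (f := (fun x => Option.map (fun v => (x, v))
        (if 0 < List.count x (List.map pvClassify features)
         then some ((List.count x (List.map pvClassify features) : Nat) : Int) else none)) ∘ pvRstripUnderscore)
    (g := fun p => if ((features.countP fun f => PySem.Str.startswith f p : Nat) : Int) > 0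
        then some (pvRstripUnderscore p, ((features.countP fun f => PySem.Str.startswith f p : Nat) : Int))
        else none)
    (by
      intro p hp
      simp only [Function.comp_apply, hcntP p hp]
      by_cases hpos : 0 < features.countP fun f => PySem.Str.startswith f p
      · simp [hpos, Int.natCast_pos.mpr hpos]
      · have : ¬ ((0:Int) < (features.countP fun f => PySem.Str.startswith f p : Nat)) := by
          simpa [Int.natCast_pos] using hpos
        simp [hpos, this])
  rw [hfm]
  have hoth : (Option.map (fun v => (("OTHER" : String), v))
      (if 0 < List.count ("OTHER" : String) (List.map pvClassify features)
       then some ((List.count ("OTHER" : String) (List.map pvClassify features) : Nat) : Int) else none))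
      = if ((features.countP fun f => !(pvModalityPrefixes.any fun p => PySem.Str.startswith f p) : Nat) : Int) > 0
        then some (("OTHER" : String), ((features.countP fun f => !(pvModalityPrefixes.any fun p => PySem.Str.startswith f p) : Nat) : Int))
        else none := by
    rw [hcntO]
    by_cases hpos : 0 < features.countP fun f => !(pvModalityPrefixes.any fun p => PySem.Str.startswith f p)
    · simp [hpos, Int.natCast_pos.mpr hpos]
    · have : ¬ ((0:Int) < (features.countP fun f => !(pvModalityPrefixes.any fun p => PySem.Str.startswith f p) : Nat)) := by
        simpa [Int.natCast_pos] using hpos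
      simp [hpos, this]
  simp only [List.filterMap_cons, List.filterMap_nil, hoth]
  by_cases hpos : ((features.countP fun f => !(pvModalityPrefixes.any fun p => PySem.Str.startswith f p) : Nat) : Int) > 0
  · simp only [if_pos hpos]
  · simp only [if_neg hpos, List.append_nil]
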